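-- pv_equiv track=rewrite | github.com/krukj/deterministic-actions-and-time | src/utils.py | generate_full_states
-- ===== SOURCE A (Python) =====
-- import itertools
--
-- def generate_full_states(partial_state: dict[str, bool], all_fluents: list[str]) -> list[dict]:
--     """Generate full states out of partial state and all possible fluents.
--
--     Args:
--         partial_state (dict[str, bool]): A state that (possibly) does not contain all fluents.
--         all_fluents (list[str]): All fluents.
--
--     Returns:
--         list[dict]: List of all possible states containing partial state.
--     """
--     missing_fluents = [f for f in all_fluents if f not in partial_state]
--     combinations = itertools.product([True, False], repeat=len(missing_fluents))
--
--     full_states = []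
--     for combo in combinations:
--         new_state = partial_state.copy()
--         new_state.update(dict(zip(missing_fluents, combo)))
--         full_states.append(new_state)
--     return full_states
-- ===== SOURCE B (Python) =====
-- def generate_full_states(partial_state: dict[str, bool], all_fluents: list[str]) -> list[dict]:
--     """Generate full states by incrementally doubling the state list, one
--     missing fluent at a time (True branch before False branch)."""
--     missing = [f for f in all_fluents if f not in partial_state]
--     states = [dict(partial_state)]
--     for f in missing:
--         states = [ns for s in states for ns in ({**s, f: True}, {**s, f: False})]
--     return states
-- ===== Notes on version B (the rewrite author's own statement) =====
-- stated objective: alternative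
-- what changed: Replaces itertools.product over full truth-value tuples plus a bulk dict(zip)/update per combination with an incremental doubling of the state list: for each missing fluent the accumulator is rebuilt with a True copy before a False copy of every state, which reproduces product's slowest-first order.
import Mathlib
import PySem

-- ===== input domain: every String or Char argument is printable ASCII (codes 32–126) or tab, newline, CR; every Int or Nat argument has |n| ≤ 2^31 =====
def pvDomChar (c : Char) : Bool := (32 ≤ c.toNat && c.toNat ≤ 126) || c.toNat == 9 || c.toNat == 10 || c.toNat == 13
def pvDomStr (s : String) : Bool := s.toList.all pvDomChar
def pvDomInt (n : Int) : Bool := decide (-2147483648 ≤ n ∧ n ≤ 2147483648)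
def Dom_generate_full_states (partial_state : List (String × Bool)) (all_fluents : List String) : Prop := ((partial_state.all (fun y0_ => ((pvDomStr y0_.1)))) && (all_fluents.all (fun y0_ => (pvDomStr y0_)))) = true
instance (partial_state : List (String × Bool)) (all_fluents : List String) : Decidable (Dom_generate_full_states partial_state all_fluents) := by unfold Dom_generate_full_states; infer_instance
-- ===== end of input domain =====

-- B replaces the itertools.product enumeration with incremental doubling of the state
-- list, one missing fluent at a time (alternative decomposition, similar cost).

-- Python dict assignment d[k] = v on an association list: overwrite in place, new keys append (exact).
def pvInsert : List (String × Bool) → String → Bool → List (String × Bool)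
  | [], k, v => [(k, v)]
  | kv :: rest, k, v => if kv.1 == k then (k, v) :: rest else kv :: pvInsert rest k v

-- ===== PORT A =====
-- itertools.product([True, False], repeat=n), ported by hand (exact: leftmost position varies slowest).
def pvProduct : Nat → List (List Bool)
  | 0 => [[]]
  | n + 1 => [true, false].flatMap (fun b => (pvProduct n).map (fun c => b :: c))

def generate_full_states (partial_state : List (String × Bool)) (all_fluents : List String) : List (List (String × Bool)) :=
  let missing_fluents := all_fluents.filter (fun f => !(partial_state.any (fun kv => kv.1 == f)))
  let combinations := pvProduct missing_fluents.length
  combinations.foldl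
    (fun full_states combo =>
      -- new_state = partial_state.copy(); new_state.update(dict(zip(missing_fluents, combo)))
      let inner := (missing_fluents.zip combo).foldl (fun z kv => pvInsert z kv.1 kv.2) []
      let new_state := inner.foldl (fun st kv => pvInsert st kv.1 kv.2) partial_state
      full_states ++ [new_state])
    []

-- ===== PORT B =====
def generate_full_states_alt (partial_state : List (String × Bool)) (all_fluents : List String) : List (List (String × Bool)) :=
  (all_fluents.filter (fun f => !(partial_state.any (fun kv => kv.1 == f)))).foldl
    (fun states f => states.flatMap (fun s => [pvInsert s f true, pvInsert s f false]))
    [partial_state]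

-- ===== PRECONDITION & SPEC =====
def Spec_generate_full_states (partial_state : List (String × Bool)) (all_fluents : List String) (out : List (List (String × Bool))) : Prop := out = generate_full_states_alt partial_state all_fluents
instance (partial_state : List (String × Bool)) (all_fluents : List String) (out : List (List (String × Bool))) : Decidable (Spec_generate_full_states partial_state all_fluents out) := by unfold Spec_generate_full_states; infer_instance

-- ===== CLAIM (what is proved, stated in full; the proofs are below) =====
def Claim_equal_generate_full_states : Prop := ∀ (partial_state : List (String × Bool)) (all_fluents : List String), Dom_generate_full_states partial_state all_fluents → Spec_generate_full_states partial_state all_fluents (generate_full_states partial_state all_fluents)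

-- ===== LEMMAS AND PROOFS =====

-- keys of an association list
def pvKeys (d : List (String × Bool)) : List String := d.map Prod.fst

theorem pvKeys_insert (d : List (String × Bool)) (k : String) (v : Bool) :
    pvKeys (pvInsert d k v) = if k ∈ pvKeys d then pvKeys d else pvKeys d ++ [k] := by
  induction d with
  | nil => simp [pvInsert, pvKeys]
  | cons kv rest ih =>
    obtain ⟨k1, v1⟩ := kv
    by_cases h : k1 = k
    · subst h
      simp [pvInsert, pvKeys]
    · have hb : (k1 == k) = false := by simp [h]
      simp only [pvInsert, hb, Bool.false_eq_true, if_false, pvKeys, List.map_cons] at ih ⊢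
      rw [ih]
      by_cases hm : k ∈ rest.map Prod.fst <;> simp [hm, Ne.symm h]

theorem pvKeys_insert_nodup (d : List (String × Bool)) (k : String) (v : Bool)
    (h : (pvKeys d).Nodup) : (pvKeys (pvInsert d k v)).Nodup := by
  rw [pvKeys_insert]
  split_ifs with hm
  · exact h
  · exact List.Nodup.append h (List.nodup_singleton k)
      (by intro a ha hk; simp only [List.mem_singleton] at hk; exact hm (hk ▸ ha))

theorem pvMem_keys_insert_self (d : List (String × Bool)) (k : String) (v : Bool) :
    k ∈ pvKeys (pvInsert d k v) := by
  rw [pvKeys_insert]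
  split_ifs with h
  · exact h
  · simp

theorem pvMem_keys_insert_mono (d : List (String × Bool)) (k a : String) (v : Bool)
    (h : a ∈ pvKeys d) : a ∈ pvKeys (pvInsert d k v) := by
  rw [pvKeys_insert]
  split_ifs <;> simp [h]

-- inserting the same key twice: the first value is irrelevant
theorem pvInsert_idem (d : List (String × Bool)) (k : String) (v v' : Bool) :
    pvInsert (pvInsert d k v') k v = pvInsert d k v := by
  induction d with
  | nil => simp [pvInsert]
  | cons kv rest ih =>
    obtain ⟨k1, v1⟩ := kv
    by_cases h : k1 = k
    · simp [pvInsert, h]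
    · simp [pvInsert, h, ih]

-- overwriting a PRESENT key commutes with inserting a distinct key
theorem pvInsert_comm_mem (e : List (String × Bool)) {a k : String} (h : a ≠ k)
    (hk : k ∈ pvKeys e) (b v : Bool) :
    pvInsert (pvInsert e k v) a b = pvInsert (pvInsert e a b) k v := by
  induction e with
  | nil => simp [pvKeys] at hk
  | cons x e ih =>
    obtain ⟨x1, w⟩ := x
    by_cases h1 : x1 = k
    · subst h1
      simp [pvInsert, Ne.symm h]
    · have hk' : k ∈ pvKeys e := by
        simp only [pvKeys, List.map_cons, List.mem_cons] at hk
        exact hk.resolve_left (fun hh => h1 hh.symm)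
      by_cases h3 : x1 = a
      · subst h3
        simp [pvInsert, h]
      · simp [pvInsert, h1, h3, ih hk']

-- a fold over pairs whose keys avoid k commutes with overwriting the present key k
theorem pvFoldl_insert_mem (ps : List (String × Bool)) (e : List (String × Bool))
    (k : String) (v : Bool) (hk : k ∈ pvKeys e) (h : k ∉ ps.map Prod.fst) :
    ps.foldl (fun st kv => pvInsert st kv.1 kv.2) (pvInsert e k v)
      = pvInsert (ps.foldl (fun st kv => pvInsert st kv.1 kv.2) e) k v := by
  induction ps generalizing e with
  | nil => rfl
  | cons p ps ih =>
    simp only [List.map_cons, List.mem_cons, not_or] at h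
    simp only [List.foldl_cons]
    rw [pvInsert_comm_mem e (Ne.symm h.1) hk p.2 v]
    exact ih (pvInsert e p.1 p.2) (pvMem_keys_insert_mono e p.1 k p.2 hk) h.2

-- only the LAST insert at k matters, once no later pair touches k
theorem pvFoldl_overwrite (ps : List (String × Bool)) (e : List (String × Bool))
    (k : String) (v v' : Bool) (h : k ∉ ps.map Prod.fst) :
    ps.foldl (fun st kv => pvInsert st kv.1 kv.2) (pvInsert e k v)
      = pvInsert (ps.foldl (fun st kv => pvInsert st kv.1 kv.2) (pvInsert e k v')) k v := by
  rw [← pvInsert_idem e k v v']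
  exact pvFoldl_insert_mem ps (pvInsert e k v') k v (pvMem_keys_insert_self e k v') h

-- folding (an insert into z) into d = inserting into (z folded into d), for z with unique keys
theorem pvFoldl_of_insert (z : List (String × Bool)) (d : List (String × Bool))
    (k : String) (v : Bool) (hz : (pvKeys z).Nodup) :
    (pvInsert z k v).foldl (fun st kv => pvInsert st kv.1 kv.2) d
      = pvInsert (z.foldl (fun st kv => pvInsert st kv.1 kv.2) d) k v := by
  induction z generalizing d with
  | nil => rfl
  | cons kv rest ih =>
    obtain ⟨k1, v1⟩ := kv
    simp only [pvKeys, List.map_cons, List.nodup_cons] at hz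
    by_cases h : k1 = k
    · subst h
      have h1 : pvInsert ((k1, v1) :: rest) k1 v = (k1, v) :: rest := by simp [pvInsert]
      rw [h1]
      simp only [List.foldl_cons]
      exact pvFoldl_overwrite rest d k1 v v1 hz.1
    · have h1 : pvInsert ((k1, v1) :: rest) k v = (k1, v1) :: pvInsert rest k v := by
        simp [pvInsert, h]
      rw [h1]
      simp only [List.foldl_cons]
      exact ih (pvInsert d k1 v1) hz.2

-- collapsing the two-stage update: building dict(zip(..)) first and then updating
-- equals folding the pairs directly into the base dict
theorem pvFoldl_foldl (ps : List (String × Bool)) (z d : List (String × Bool))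
    (hz : (pvKeys z).Nodup) :
    (ps.foldl (fun st kv => pvInsert st kv.1 kv.2) z).foldl
        (fun st kv => pvInsert st kv.1 kv.2) d
      = ps.foldl (fun st kv => pvInsert st kv.1 kv.2)
          (z.foldl (fun st kv => pvInsert st kv.1 kv.2) d) := by
  induction ps generalizing z d with
  | nil => rfl
  | cons p ps ih =>
    simp only [List.foldl_cons]
    rw [ih (pvInsert z p.1 p.2) d (pvKeys_insert_nodup z p.1 p.2 hz),
        pvFoldl_of_insert z d p.1 p.2 hz]

theorem pvFoldl_append_map (g : List Bool → List (String × Bool)) :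
    ∀ (l : List (List Bool)) (acc : List (List (String × Bool))),
      l.foldl (fun a c => a ++ [g c]) acc = acc ++ l.map g := by
  intro l
  induction l with
  | nil => simp
  | cons c l ih => intro acc; simp [ih]

-- A's value as a function of base dict and missing-fluent list
def pvG (d : List (String × Bool)) (ms : List String) : List (List (String × Bool)) :=
  (pvProduct ms.length).map
    (fun c => (ms.zip c).foldl (fun st kv => pvInsert st kv.1 kv.2) d)

theorem pvG_cons (d : List (String × Bool)) (f : String) (ms : List String) :
    pvG d (f :: ms) = pvG (pvInsert d f true) ms ++ pvG (pvInsert d f false) ms := by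
  simp [pvG, pvProduct, List.map_map, Function.comp_def]

theorem pvB_gen (ms : List String) :
    ∀ (states : List (List (String × Bool))),
      ms.foldl (fun states f =>
          states.flatMap (fun s => [pvInsert s f true, pvInsert s f false])) states
        = states.flatMap (fun s => pvG s ms) := by
  induction ms with
  | nil => intro states; simp [pvG, pvProduct]
  | cons f ms ih =>
    intro states
    simp only [List.foldl_cons]
    rw [ih, List.flatMap_assoc]
    congr 1
    funext s
    simp [pvG_cons]

-- ===== VERDICT (by name: the statement is the Claim_ definition above) =====
theorem generate_full_states_spec : Claim_equal_generate_full_states := by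
  intro partial_state all_fluents _
  unfold Spec_generate_full_states generate_full_states generate_full_states_alt
  set missing := all_fluents.filter (fun f => !(partial_state.any (fun kv => kv.1 == f))) with hm
  simp only []
  rw [pvFoldl_append_map, pvB_gen, List.nil_append]
  have : ∀ c, ((missing.zip c).foldl (fun z kv => pvInsert z kv.1 kv.2) []).foldl
        (fun st kv => pvInsert st kv.1 kv.2) partial_state
      = (missing.zip c).foldl (fun st kv => pvInsert st kv.1 kv.2) partial_state := by
    intro c
    exact pvFoldl_foldl (missing.zip c) [] partial_state (by simp [pvKeys])
  simp only [this]
  simp [pvG]
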